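-- pv_equiv track=rewrite | github.com/cxygiao/DQC | distributedQuantum/toffoli_test.py | matrix_list_to_gate_list
-- ===== SOURCE A (Python) =====
-- def matrix_list_to_gate_list(matrix_list):
--     gate_list = []
--     for i in range(len(matrix_list)-1):
--         if matrix_list[i] == 1:
--             gate_list.append(i)
--     for j in range(len(matrix_list)-1):
--         if matrix_list[j] == 2:
--             gate_list.append(j)
--     return gate_list
-- ===== SOURCE B (Python) =====
-- def matrix_list_to_gate_list(matrix_list):
--     buckets = {}
--     for i in range(len(matrix_list) - 1):
--         buckets.setdefault(matrix_list[i], []).append(i)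
--     return buckets.get(1, []) + buckets.get(2, [])
-- ===== Notes on version B (the rewrite author's own statement) =====
-- stated objective: alternative
-- what changed: A scans the index range twice (once collecting value-1 indices, once value-2); B makes a single pass grouping indices into a dict keyed by value and reads out the 1-bucket followed by the 2-bucket.
import Mathlib
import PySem

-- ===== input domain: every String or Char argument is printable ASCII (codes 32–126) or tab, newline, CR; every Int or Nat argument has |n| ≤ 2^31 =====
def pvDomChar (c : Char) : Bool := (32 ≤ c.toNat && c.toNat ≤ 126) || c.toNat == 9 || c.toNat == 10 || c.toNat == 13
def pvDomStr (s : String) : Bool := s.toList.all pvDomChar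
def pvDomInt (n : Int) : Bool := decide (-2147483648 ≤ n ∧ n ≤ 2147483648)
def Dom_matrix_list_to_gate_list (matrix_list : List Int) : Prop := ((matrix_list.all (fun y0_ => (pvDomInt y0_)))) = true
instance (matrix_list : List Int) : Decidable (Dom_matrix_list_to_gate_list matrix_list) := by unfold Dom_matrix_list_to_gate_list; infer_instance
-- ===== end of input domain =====

-- B replaces A's two scans over the index range by one grouping pass into a
-- dict of index buckets keyed by value, then reads bucket 1 followed by bucket 2 (alternative decomposition, same cost).

-- ===== PORT A =====
def matrix_list_to_gate_list (matrix_list : List Int) : List Int :=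
  let gate_list : List Int := []
  let gate_list :=
    (PySem.List.pyRange 0 ((matrix_list.length : Int) - 1) 1).foldl
      (fun gate_list i =>
        if PySem.List.pyGetD matrix_list i 0 == 1 then gate_list ++ [i] else gate_list)
      gate_list
  let gate_list :=
    (PySem.List.pyRange 0 ((matrix_list.length : Int) - 1) 1).foldl
      (fun gate_list j =>
        if PySem.List.pyGetD matrix_list j 0 == 2 then gate_list ++ [j] else gate_list)
      gate_list
  gate_list

-- ===== PORT B =====
def matrix_list_to_gate_list_alt (matrix_list : List Int) : List Int :=
  let buckets : PySem.Dict Int (List Int) :=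
    (PySem.List.pyRange 0 ((matrix_list.length : Int) - 1) 1).foldl
      (fun buckets i =>
        buckets.modify (PySem.List.pyGetD matrix_list i 0) [] (fun l => l ++ [i]))
      PySem.Dict.empty
  buckets.getD 1 [] ++ buckets.getD 2 []

-- ===== PRECONDITION & SPEC =====
def Spec_matrix_list_to_gate_list (matrix_list : List Int) (out : List Int) : Prop := out = matrix_list_to_gate_list_alt matrix_list
instance (matrix_list : List Int) (out : List Int) : Decidable (Spec_matrix_list_to_gate_list matrix_list out) := by unfold Spec_matrix_list_to_gate_list; infer_instance

-- ===== CLAIM (what is proved, stated in full; the proofs are below) =====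
def Claim_equal_matrix_list_to_gate_list : Prop := ∀ (matrix_list : List Int), Dom_matrix_list_to_gate_list matrix_list → Spec_matrix_list_to_gate_list matrix_list (matrix_list_to_gate_list matrix_list)

-- ===== LEMMAS AND PROOFS =====

-- The grouping fold's bucket at key k is the old bucket followed by the k-valued indices of L.
theorem bucket_foldl (m : List Int) (k : Int) :
    ∀ (L : List Int) (d : PySem.Dict Int (List Int)),
      (L.foldl (fun d i => d.modify (PySem.List.pyGetD m i 0) [] (fun l => l ++ [i])) d).getD k []
        = d.getD k [] ++ L.filter (fun i => PySem.List.pyGetD m i 0 == k) := by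
  intro L
  induction L with
  | nil => intro d; simp
  | cons i L ih =>
    intro d
    simp only [List.foldl_cons, List.filter_cons, ih]
    rw [PySem.Dict.getD_modify]
    by_cases h : k = PySem.List.pyGetD m i 0
    · simp [h, beq_iff_eq]
    · have h' : (PySem.List.pyGetD m i 0 == k) = false := by
        simp [beq_iff_eq]; exact fun e => h e.symm
      simp [h, h']

-- ===== VERDICT (by name: the statement is the Claim_ definition above) =====
theorem matrix_list_to_gate_list_spec : Claim_equal_matrix_list_to_gate_list := by
  intro m _
  unfold Spec_matrix_list_to_gate_list matrix_list_to_gate_list matrix_list_to_gate_list_alt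
  simp only [PySem.List.foldl_append_if_eq_filter, List.nil_append, bucket_foldl,
    PySem.Dict.getD_empty, List.nil_append]
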